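-- pv_equiv track=rewrite | github.com/TEGUHBHS/praxis-academy | kemampuan-dasar/kemampuan-dasar-1/latihan/angka.py | kiri
-- ===== SOURCE A (Python) =====
-- def kiri(i, n):
--     a = ""
--     for j in range(i, n):
--         if i == 0:
--             a += "x"
--         elif j > i:
--             a += " "
--         else:
--             a += "x"
--     return a
-- ===== SOURCE B (Python) =====
-- def kiri(i, n):
--     if n <= i:
--         return ""
--     if i == 0:
--         return "x" * n
--     return "x" + " " * (n - i - 1)
-- ===== Notes on version B (the rewrite author's own statement) =====
-- stated objective: simpler
-- what changed: Replaces the per-character accumulation loop over range(i, n) with a closed-form expression using string multiplication: empty when n<=i, 'x'*n when i==0, else 'x' followed by n-i-1 spaces.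
import Mathlib
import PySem

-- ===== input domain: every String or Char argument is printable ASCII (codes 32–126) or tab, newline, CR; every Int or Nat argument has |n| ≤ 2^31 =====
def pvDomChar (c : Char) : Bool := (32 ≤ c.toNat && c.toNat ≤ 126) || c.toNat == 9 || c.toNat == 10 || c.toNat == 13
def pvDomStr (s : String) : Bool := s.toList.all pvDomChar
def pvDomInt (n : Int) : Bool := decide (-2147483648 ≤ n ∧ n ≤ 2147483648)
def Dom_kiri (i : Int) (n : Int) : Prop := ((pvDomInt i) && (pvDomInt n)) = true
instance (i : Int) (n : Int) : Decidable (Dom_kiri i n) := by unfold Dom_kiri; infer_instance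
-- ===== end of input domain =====

-- B replaces A's per-character accumulation loop with a closed-form string expression (simpler).

-- ===== PORT A =====
def kiri (i : Int) (n : Int) : String :=
  (PySem.List.pyRange i n 1).foldl
    (fun a j => if i == 0 then a ++ "x" else if j > i then a ++ " " else a ++ "x") ""

-- ===== PORT B =====
def kiri_alt (i : Int) (n : Int) : String :=
  if n ≤ i then ""
  else if i == 0 then String.ofList (List.replicate n.toNat 'x')
  else "x" ++ String.ofList (List.replicate (n - i - 1).toNat ' ')

-- ===== PRECONDITION & SPEC =====
def Spec_kiri (i : Int) (n : Int) (out : String) : Prop := out = kiri_alt i n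
instance (i : Int) (n : Int) (out : String) : Decidable (Spec_kiri i n out) := by unfold Spec_kiri; infer_instance

-- ===== CLAIM (what is proved, stated in full; the proofs are below) =====
def Claim_equal_kiri : Prop := ∀ (i : Int) (n : Int), Dom_kiri i n → Spec_kiri i n (kiri i n)

-- ===== LEMMAS AND PROOFS =====

-- A's loop, characterised: each iteration appends exactly one character.
theorem kiri_fold_toList (i : Int) : ∀ (l : List Int) (s : String),
    (l.foldl (fun a j => if i == 0 then a ++ "x" else if j > i then a ++ " " else a ++ "x") s).toList
      = s.toList ++ l.map (fun j => if i == 0 then 'x' else if j > i then ' ' else 'x') := by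
  intro l
  induction l with
  | nil => intro s; simp
  | cons h t ih =>
      intro s
      rw [List.foldl_cons, List.map_cons, ih]
      split_ifs with h0 hj <;> simp

theorem kiri_eq_alt (i n : Int) : kiri i n = kiri_alt i n := by
  apply String.toList_inj.mp
  unfold kiri kiri_alt
  rw [kiri_fold_toList]
  by_cases hle : n ≤ i
  · rw [PySem.List.pyRange_one_eq_nil hle]
    simp [hle]
  · have hlt : i < n := lt_of_not_ge hle
    by_cases h0 : i = 0
    · subst h0
      simp only [if_neg hle, if_pos (by simp : ((0:Int) == 0) = true)]
      simp [List.map_const', PySem.List.length_pyRange_one]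
    · have h0' : (i == 0) = false := by simp [h0]
      rw [PySem.List.pyRange_one_cons hlt]
      have htail : (PySem.List.pyRange (i+1) n 1).map
            (fun j => if (i == 0) = true then 'x' else if j > i then ' ' else 'x')
          = List.replicate (n - i - 1).toNat ' ' := by
        rw [List.map_congr_left (g := fun _ => ' ')
            (fun j hj => by
              have := (PySem.List.mem_pyRange_one.mp hj).1
              simp [h0', show i < j by omega])]
        rw [List.map_const', PySem.List.length_pyRange_one]
        congr 1
        omega
      rw [List.map_cons, htail]
      simp [hle, h0]

-- ===== VERDICT (by name: the statement is the Claim_ definition above) =====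
theorem kiri_spec : Claim_equal_kiri := by
  intro i n _
  unfold Spec_kiri
  exact kiri_eq_alt i n
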